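-- pv_equiv track=rewrite | github.com/Unidecimal/advent-of-code | 2015/p1/main.py | find_position_of_caracter_at_floor
-- ===== SOURCE A (Python) =====
-- def find_position_of_caracter_at_floor(data_1, target_floor):
--     current_floor = 0
--
--     for index, caracter in enumerate([*data_1]):
--         if caracter in "(":
--             current_floor += 1
--         if caracter in ")":
--             current_floor -= 1
--         if current_floor == target_floor:
--             return index + 1
--     return
-- ===== SOURCE B (Python) =====
-- def find_position_of_caracter_at_floor(data_1, target_floor):
--     # Build the full prefix-floor table first, then look the target up with list.index.
--     prefix = [0]
--     for c in data_1:
--         prefix.append(prefix[-1] + (1 if c == '(' else -1 if c == ')' else 0))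
--     floors = prefix[1:]
--     if target_floor in floors:
--         return floors.index(target_floor) + 1
--     return None
-- ===== Notes on version B (the rewrite author's own statement) =====
-- stated objective: alternative
-- what changed: B first builds the whole prefix-sum floor table, then finds the target with a membership test and list.index, instead of A's single stateful scan with in-loop early return.
import Mathlib
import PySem

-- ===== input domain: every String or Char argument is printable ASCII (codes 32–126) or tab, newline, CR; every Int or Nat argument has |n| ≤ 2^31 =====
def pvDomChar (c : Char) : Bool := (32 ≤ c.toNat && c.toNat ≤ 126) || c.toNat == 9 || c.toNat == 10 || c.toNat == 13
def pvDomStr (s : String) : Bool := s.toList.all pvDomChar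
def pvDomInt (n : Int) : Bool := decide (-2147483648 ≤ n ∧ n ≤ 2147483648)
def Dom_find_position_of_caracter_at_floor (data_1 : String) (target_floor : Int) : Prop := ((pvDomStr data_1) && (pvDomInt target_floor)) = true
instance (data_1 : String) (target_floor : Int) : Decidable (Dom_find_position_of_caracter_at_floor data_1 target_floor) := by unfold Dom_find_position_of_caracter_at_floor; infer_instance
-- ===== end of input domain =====

-- B builds the full prefix-floor table and looks the target up with list.index, instead of A's single stateful scan with in-loop early return (alternative decomposition, same cost).


-- ===== PORT A =====
-- A's loop over enumerate([*data_1]): two sequential ifs update current_floor, then the check returns index+1.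
def pvGoA (target_floor : Int) : List Char → Int → Nat → Option Int
  | [], _, _ => none
  | c :: cs, current_floor, index =>
    let f1 := if c = '(' then current_floor + 1 else current_floor   -- if caracter in "("
    let f2 := if c = ')' then f1 - 1 else f1                         -- if caracter in ")"
    if f2 = target_floor then some ((index : Int) + 1) else pvGoA target_floor cs f2 (index + 1)

def find_position_of_caracter_at_floor (data_1 : String) (target_floor : Int) : Option Int :=
  pvGoA target_floor data_1.toList 0 0

-- ===== PORT B =====
-- prefix.append(prefix[-1] + (1 if c == '(' else -1 if c == ')' else 0))
def pvStepB (acc : List Int) (c : Char) : List Int :=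
  acc ++ [acc.getLast! + (if c = '(' then 1 else if c = ')' then -1 else 0)]

def find_position_of_caracter_at_floor_alt (data_1 : String) (target_floor : Int) : Option Int :=
  let prefixList := data_1.toList.foldl pvStepB [0]
  let floors := prefixList.drop 1    -- prefix[1:]
  if floors.contains target_floor then
    match PySem.List.index? floors target_floor with   -- floors.index(target_floor)
    | some k => some ((k : Int) + 1)
    | none => none
  else none

-- ===== PRECONDITION & SPEC =====
def Spec_find_position_of_caracter_at_floor (data_1 : String) (target_floor : Int) (out : Option Int) : Prop := out = find_position_of_caracter_at_floor_alt data_1 target_floor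
instance (data_1 : String) (target_floor : Int) (out : Option Int) : Decidable (Spec_find_position_of_caracter_at_floor data_1 target_floor out) := by unfold Spec_find_position_of_caracter_at_floor; infer_instance

-- ===== CLAIM (what is proved, stated in full; the proofs are below) =====
def Claim_equal_find_position_of_caracter_at_floor : Prop := ∀ (data_1 : String) (target_floor : Int), Dom_find_position_of_caracter_at_floor data_1 target_floor → Spec_find_position_of_caracter_at_floor data_1 target_floor (find_position_of_caracter_at_floor data_1 target_floor)

-- ===== LEMMAS AND PROOFS =====

def pvDelta (c : Char) : Int := if c = '(' then 1 else if c = ')' then -1 else 0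

-- the running-floor (prefix-sum) sequence starting from f
def pvScan (f : Int) : List Char → List Int
  | [] => []
  | c :: cs => (f + pvDelta c) :: pvScan (f + pvDelta c) cs

theorem pvGetLast!_eq {l : List Int} (h : l ≠ []) : l.getLast! = l.getLast h := by
  cases l with
  | nil => exact absurd rfl h
  | cons a as => simp [List.getLast!]

theorem pvStepB_floor (f : Int) (c : Char) :
    (if c = ')' then (if c = '(' then f + 1 else f) - 1 else (if c = '(' then f + 1 else f))
      = f + pvDelta c := by
  unfold pvDelta
  split_ifs <;> simp_all <;> omega

theorem pvFoldl_eq_scan (cs : List Char) (acc : List Int) (h : acc ≠ []) :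
    cs.foldl pvStepB acc = acc ++ pvScan (acc.getLast h) cs := by
  induction cs generalizing acc with
  | nil => simp [pvScan]
  | cons c cs ih =>
      have hne : acc ++ [acc.getLast h + pvDelta c] ≠ [] := by simp
      have hlast : (acc ++ [acc.getLast h + pvDelta c]).getLast hne = acc.getLast h + pvDelta c := by
        simp
      simp only [List.foldl_cons]
      rw [show pvStepB acc c = acc ++ [acc.getLast h + pvDelta c] by
            simp only [pvStepB, pvGetLast!_eq h, pvDelta]]
      rw [ih _ hne, hlast]
      simp [pvScan]

theorem pvGoA_eq_index (target : Int) (cs : List Char) (f : Int) (i : Nat) :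
    pvGoA target cs f i
      = (PySem.List.index? (pvScan f cs) target).map (fun k => (i : Int) + (k : Int) + 1) := by
  induction cs generalizing f i with
  | nil => simp [pvGoA, pvScan, PySem.List.index?]
  | cons c cs ih =>
      have hbody :
          pvGoA target (c :: cs) f i
            = if f + pvDelta c = target then some ((i : Int) + 1)
              else pvGoA target cs (f + pvDelta c) (i + 1) := by
        simp only [pvGoA, pvStepB_floor]
      rw [hbody, pvScan]
      by_cases h : f + pvDelta c = target
      · rw [if_pos h, h, PySem.List.index?_cons_self]
        simp
      · rw [if_neg h, PySem.List.index?_cons_of_ne _ h, ih]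
        cases PySem.List.index? (pvScan (f + pvDelta c) cs) target with
        | none => simp
        | some k =>
            simp
            omega

theorem find_position_of_caracter_at_floor_spec : Claim_equal_find_position_of_caracter_at_floor := by
  intro data_1 target_floor _
  unfold Spec_find_position_of_caracter_at_floor
  unfold find_position_of_caracter_at_floor find_position_of_caracter_at_floor_alt
  have h0 : ([0] : List Int) ≠ [] := by simp
  simp only []
  rw [pvFoldl_eq_scan data_1.toList [0] h0]
  simp only [List.getLast_singleton]
  rw [pvGoA_eq_index]
  have hdrop : (([0] : List Int) ++ pvScan 0 data_1.toList).drop 1 = pvScan 0 data_1.toList := by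
    simp
  rw [hdrop]
  by_cases hmem : target_floor ∈ pvScan 0 data_1.toList
  · have hc : (pvScan 0 data_1.toList).contains target_floor = true := by
      simpa using hmem
    rw [if_pos hc]
    cases hidx : PySem.List.index? (pvScan 0 data_1.toList) target_floor with
    | none =>
        rw [PySem.List.index?_eq_none_iff] at hidx
        exact absurd hmem hidx
    | some k => simp
  · have hc : ¬ ((pvScan 0 data_1.toList).contains target_floor = true) := by
      simpa using hmem
    have hnone : PySem.List.index? (pvScan 0 data_1.toList) target_floor = none := by
      rw [PySem.List.index?_eq_none_iff]; exact hmem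
    rw [if_neg hc, hnone]
    simp
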